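-- pv_equiv track=rewrite | github.com/Sureshmohan19/ai_research_path | src/rnn.py | training_data
-- ===== SOURCE A (Python) =====
-- def training_data(sequence):
--     text = sequence # hello world
--     char = sorted(list(set(text))) # [' ', 'd', 'e', 'h', 'l', 'o', 'r', 'w']
--     vocab_size = len(char) # 8
--     char_to_idx = {ch:i for i, ch in enumerate(char)}
--     # {' ': 0, 'd': 1, 'e': 2, 'h': 3, 'l': 4, 'o': 5, 'r': 6, 'w': 7}
--     idx_to_char = {i:ch for i, ch in enumerate(char)}
--     # {0: ' ', 1: 'd', 2: 'e', 3: 'h', 4: 'l', 5: 'o', 6: 'r', 7: 'w'}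
--
--     data = []
--     for i in range(len(text)-1):
--         input_ch = text[:i+1]
--         target_ch = text[i+1]
--         input_idx = [char_to_idx[ch] for ch in input_ch]
--         target_idx = char_to_idx[target_ch]
--         data.append((input_idx, target_idx))
--     # data:
--     # [([3], 2), -> he
--     #  ([3, 2], 4), -> hel
--     #  ([3, 2, 4], 4), -> hell
--     #  ([3, 2, 4, 4], 5), -> hello
--     #  ([3, 2, 4, 4, 5], 0), -> hello(space
--     #  ([3, 2, 4, 4, 5, 0], 7), -> hello(space)w
--     #  ([3, 2, 4, 4, 5, 0, 7], 5), -> hello(space)wo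
--     #  ([3, 2, 4, 4, 5, 0, 7, 5], 6), -> hello(space)wor
--     #  ([3, 2, 4, 4, 5, 0, 7, 5, 6], 4), -> hello(space)worl
--     #  ([3, 2, 4, 4, 5, 0, 7, 5, 6, 4], 1),] -> hello(space)world
--     return data, vocab_size, char_to_idx, idx_to_char
-- ===== SOURCE B (Python) =====
-- def training_data(sequence):
--     srt = sorted(sequence)
--     chars = srt[:1] + [b for a, b in zip(srt, srt[1:]) if a != b]
--     vocab_size = len(chars)
--     char_to_idx = {}
--     idx_to_char = {}
--     for i, ch in enumerate(chars):
--         char_to_idx[ch] = i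
--         idx_to_char[i] = ch
--     data = []
--     prefix = []
--     for cur, nxt in zip(sequence, sequence[1:]):
--         prefix = prefix + [char_to_idx[cur]]
--         data.append((prefix, char_to_idx[nxt]))
--     return data, vocab_size, char_to_idx, idx_to_char
-- ===== Notes on version B (the rewrite author's own statement) =====
-- stated objective: alternative
-- what changed: B builds the vocabulary by sorting the whole text and removing adjacent duplicates in one scan (instead of set-then-sort), fills both dicts in a single enumerate loop, and produces the training pairs in one streaming pass over consecutive character pairs with a growing prefix accumulator (no range indexing, no per-prefix slicing or re-translation).
import Mathlib
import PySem

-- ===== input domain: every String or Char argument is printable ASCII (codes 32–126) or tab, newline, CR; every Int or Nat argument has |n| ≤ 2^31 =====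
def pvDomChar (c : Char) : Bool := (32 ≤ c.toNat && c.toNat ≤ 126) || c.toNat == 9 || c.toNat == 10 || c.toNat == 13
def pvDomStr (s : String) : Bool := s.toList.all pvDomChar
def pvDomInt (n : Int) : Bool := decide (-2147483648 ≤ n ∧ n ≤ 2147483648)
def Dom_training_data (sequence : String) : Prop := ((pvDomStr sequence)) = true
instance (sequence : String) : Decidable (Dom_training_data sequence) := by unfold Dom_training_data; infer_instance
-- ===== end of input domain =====

-- B builds the vocab by sorting the text and dropping adjacent duplicates in one scan, fills both
-- dicts in a single enumerate loop, and streams over consecutive character pairs with a growing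
-- prefix accumulator instead of indexing/slicing per position (objective: alternative, same cost).

-- ===== PORT A =====
def training_data (sequence : String) : (List (List Int × Int)) × Int × (List (String × Int)) × (List (Int × String)) :=
  let text := sequence.toList
  let char := PySem.List.sorted (PySem.Set.ofList text) id false
  let vocab_size : Int := char.length
  let char_to_idx : PySem.Dict String Int :=
    (PySem.List.enumerate char).foldl (fun d p => d.insert (String.ofList [p.2]) p.1) PySem.Dict.empty
  let idx_to_char : PySem.Dict Int String :=
    (PySem.List.enumerate char).foldl (fun d p => d.insert p.1 (String.ofList [p.2])) PySem.Dict.empty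
  let data : List (List Int × Int) :=
    (PySem.List.pyRange 0 ((text.length : Int) - 1) 1).foldl
      (fun acc i =>
        let input_ch := PySem.List.slice text none (some (i + 1))
        let target_ch := PySem.List.pyGetD text (i + 1) ' '
        let input_idx := input_ch.map (fun ch => char_to_idx.getD (String.ofList [ch]) 0)
        let target_idx := char_to_idx.getD (String.ofList [target_ch]) 0
        acc ++ [(input_idx, target_idx)]) []
  (data, vocab_size, char_to_idx.items, idx_to_char.items)

-- ===== PORT B =====
def training_data_alt (sequence : String) : (List (List Int × Int)) × Int × (List (String × Int)) × (List (Int × String)) :=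
  let srt := PySem.List.sorted sequence.toList id false
  let chars := PySem.List.slice srt none (some 1) ++
      ((srt.zip (PySem.List.slice srt (some 1) none)).filter (fun p => decide (p.1 ≠ p.2))).map (fun p => p.2)
  let vocab_size : Int := chars.length
  let dicts : PySem.Dict String Int × PySem.Dict Int String :=
    (PySem.List.enumerate chars).foldl
      (fun st p => (st.1.insert (String.ofList [p.2]) p.1, st.2.insert p.1 (String.ofList [p.2])))
      (PySem.Dict.empty, PySem.Dict.empty)
  let char_to_idx := dicts.1
  let idx_to_char := dicts.2
  let dp : List (List Int × Int) × List Int :=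
    (sequence.toList.zip (PySem.List.slice sequence.toList (some 1) none)).foldl
      (fun st p =>
        let prefix' := st.2 ++ [char_to_idx.getD (String.ofList [p.1]) 0]
        (st.1 ++ [(prefix', char_to_idx.getD (String.ofList [p.2]) 0)], prefix'))
      ([], [])
  (dp.1, vocab_size, char_to_idx.items, idx_to_char.items)

-- ===== PRECONDITION & SPEC =====
def Spec_training_data (sequence : String) (out : (List (List Int × Int)) × Int × (List (String × Int)) × (List (Int × String))) : Prop := out = training_data_alt sequence
instance (sequence : String) (out : (List (List Int × Int)) × Int × (List (String × Int)) × (List (Int × String))) : Decidable (Spec_training_data sequence out) := by unfold Spec_training_data; infer_instance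

-- ===== CLAIM (what is proved, stated in full; the proofs are below) =====
def Claim_equal_training_data : Prop := ∀ (sequence : String), Dom_training_data sequence → Spec_training_data sequence (training_data sequence)

-- ===== LEMMAS AND PROOFS =====

/-- B's adjacent-duplicate removal, as a function of the sorted list. -/
def dedupAdj (s : List Char) : List Char :=
  s.take 1 ++ ((s.zip s.tail).filter (fun p => decide (p.1 ≠ p.2))).map (fun p => p.2)

/-- On a ≤-sorted list, adjacent-duplicate removal yields a strictly increasing list with the
same members. -/
lemma dedupAdj_sorted (s : List Char) (hs : s.Pairwise (· ≤ ·)) :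
    (dedupAdj s).Pairwise (· < ·) ∧ ∀ x, x ∈ dedupAdj s ↔ x ∈ s := by
  induction s with
  | nil => simp [dedupAdj]
  | cons a t ih =>
    cases t with
    | nil => simp [dedupAdj]
    | cons b r =>
      rw [List.pairwise_cons] at hs
      obtain ⟨ha, hp⟩ := hs
      obtain ⟨ih1, ih2⟩ := ih hp
      have hstep : dedupAdj (a :: b :: r)
          = a :: (if a = b then (dedupAdj (b :: r)).tail else dedupAdj (b :: r)) := by
        by_cases hab : a = b <;> simp [dedupAdj, hab]
      by_cases hab : a = b
      · rw [hstep, if_pos hab]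
        have htl : dedupAdj (b :: r) = b :: ((dedupAdj (b :: r)).tail) := by
          simp [dedupAdj]
        constructor
        · have := ih1
          rw [htl, List.pairwise_cons] at this
          rw [List.pairwise_cons]
          refine ⟨fun y hy => hab ▸ this.1 y hy, this.2⟩
        · intro x
          have hx := ih2 x
          rw [htl] at hx
          subst hab
          simp only [List.mem_cons] at hx ⊢
          tauto
      · rw [hstep, if_neg hab]
        constructor
        · rw [List.pairwise_cons]
          refine ⟨fun y hy => ?_, ih1⟩
          have hyb : y ∈ b :: r := (ih2 y).mp hy
          have hby : b ≤ y := by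
            rcases List.mem_cons.mp hyb with h | h
            · exact le_of_eq h.symm
            · rw [List.pairwise_cons] at hp; exact hp.1 y h
          have hab' : a < b := lt_of_le_of_ne (ha b (by simp)) hab
          exact lt_of_lt_of_le hab' hby
        · intro x
          simp only [List.mem_cons, ih2 x]

/-- Sorting the distinct characters equals sorting everything and removing adjacent duplicates. -/
lemma chars_eq (text : List Char) :
    PySem.List.sorted (PySem.Set.ofList text) id false
      = dedupAdj (PySem.List.sorted text id false) := by
  have hs := PySem.List.sorted_pairwise text id
  obtain ⟨hlt, hmem⟩ := dedupAdj_sorted _ hs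
  refine PySem.List.sorted_eq_of_perm_of_pairwise_lt _ _ _ ?_ hlt
  rw [List.perm_ext_iff_of_nodup (hlt.imp fun h => ne_of_lt h) (PySem.Set.nodup_ofList _)]
  intro x
  rw [hmem x, PySem.List.mem_sorted, PySem.Set.mem_ofList]

/-- B's streaming pair loop, in closed form. -/
lemma loopB (f : Char → Int) (xs : List Char) :
    ∀ (dat : List (List Int × Int)) (pfx : List Int),
    (xs.zip xs.tail).foldl
        (fun st p =>
          let prefix' := st.2 ++ [f p.1]
          (st.1 ++ [(prefix', f p.2)], prefix')) (dat, pfx)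
      = (dat ++ (List.range (xs.length - 1)).map
            (fun k => (pfx ++ (xs.take (k + 1)).map f, f (xs.getD (k + 1) ' '))),
         pfx ++ xs.dropLast.map f) := by
  induction xs with
  | nil => simp
  | cons a t ih =>
    cases t with
    | nil => simp
    | cons b r =>
      intro dat pfx
      have hzip : ((a :: b :: r).zip (a :: b :: r).tail)
          = (a, b) :: ((b :: r).zip (b :: r).tail) := by simp
      rw [hzip, List.foldl_cons]
      dsimp only
      rw [ih]
      refine Prod.ext ?_ ?_
      · show dat ++ [(pfx ++ [f a], f b)] ++ _ = dat ++ _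
        rw [List.append_assoc]
        congr 1
        have : (a :: b :: r).length - 1 = ((b :: r).length - 1) + 1 := by simp
        rw [this, List.range_succ_eq_map, List.map_cons, List.map_map]
        simp only [List.singleton_append]
        congr 1
        · apply List.map_congr_left
          intro k _
          simp [Function.comp, Nat.succ_eq_add_one, List.take_succ_cons, List.append_assoc]
      · show pfx ++ [f a] ++ _ = pfx ++ _
        rw [List.append_assoc, List.dropLast_cons₂, List.map_cons]
        simp

-- ===== VERDICT (by name: the statement is the Claim_ definition above) =====
theorem training_data_spec : Claim_equal_training_data := by
  intro sequence _
  unfold Spec_training_data training_data training_data_alt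
  dsimp only
  set text := sequence.toList with htext
  -- vocab lists agree
  have hchars : PySem.List.sorted (PySem.Set.ofList text) id false
      = PySem.List.slice (PySem.List.sorted text id false) none (some 1) ++
        (((PySem.List.sorted text id false).zip
            (PySem.List.slice (PySem.List.sorted text id false) (some 1) none)).filter
              (fun p => decide (p.1 ≠ p.2))).map (fun p => p.2) := by
    rw [chars_eq text]
    unfold dedupAdj
    rw [PySem.List.slice_from_one, PySem.List.slice_to _ (by norm_num)]
    norm_num
  rw [← hchars]
  set chars := PySem.List.sorted (PySem.Set.ofList text) id false with hch
  -- the joint dict fold is the pair of A's two folds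
  rw [PySem.List.foldl_prod_mk
        (fun (d : PySem.Dict String Int) (p : Int × Char) => d.insert (String.ofList [p.2]) p.1)
        (fun (d : PySem.Dict Int String) (p : Int × Char) => d.insert p.1 (String.ofList [p.2]))
        (PySem.List.enumerate chars) PySem.Dict.empty PySem.Dict.empty]
  set c2i : PySem.Dict String Int :=
    (PySem.List.enumerate chars).foldl (fun d p => d.insert (String.ofList [p.2]) p.1) PySem.Dict.empty with hc2i
  set f : Char → Int := fun c => c2i.getD (String.ofList [c]) 0 with hf
  refine Prod.ext ?_ rfl
  -- data component
  rw [PySem.List.slice_from_one, loopB f text [] []]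
  dsimp only
  rw [show (fun (acc : List (List Int × Int)) (i : Int) =>
        acc ++ [((PySem.List.slice text none (some (i + 1))).map f,
                 c2i.getD (String.ofList [PySem.List.pyGetD text (i + 1) ' ']) 0)]) =
      (fun acc i => acc ++ [(fun i : Int =>
              ((PySem.List.slice text none (some (i + 1))).map f,
               f (PySem.List.pyGetD text (i + 1) ' '))) i]) from rfl]
  rw [PySem.List.foldl_append_singleton_eq_map, List.nil_append, PySem.List.pyRange_one]
  rw [List.map_map]
  have hlen : ((text.length : Int) - 1 - 0).toNat = text.length - 1 := by omega
  rw [hlen]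
  apply List.map_congr_left
  intro k hk
  have hk' : k < text.length - 1 := List.mem_range.mp hk
  simp only [Function.comp, zero_add, List.nil_append, Prod.mk.injEq]
  constructor
  · rw [show ((k : Int) + 1) = ((k + 1 : Nat) : Int) from by push_cast; ring,
        PySem.List.slice_to_natCast]
  · rw [show ((k : Int) + 1) = ((k + 1 : Nat) : Int) from by push_cast; ring,
        PySem.List.pyGetD_natCast]
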